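-- pv_equiv track=rewrite | github.com/xw23/diversio_morty_pizza | diversio_morty_pizza.py | find_pizza_combination
-- ===== SOURCE A (Python) =====
-- from typing import Dict, List, Tuple
--
-- def find_pizza_combination(combinations: List[Tuple[Dict[str, str], int]]) -> Dict[str, str]:
--
--     pref = [("crust", "Pan"), ("seasoning", "Yes"), ("sauce", "Tomato"), ("veggies", "Broccoli"), ("cheese", "No")]
--
--     maxCount = max([x[1] for x in combinations])
--     pizzaCandid = [x[0] for x in combinations if x[1] == maxCount]
--
--     if len((pizzaCandid)) == 1:
--         return pizzaCandid[0]
--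
--     for i in range(len(pref)):
--         matchPref = [pizza[pref[i][0]] == pref[i][1] for pizza in pizzaCandid].count(True)
--
--         if matchPref == 0:   # if no matched preference, no pizza is eliminated from list of candidates
--             continue
--
--         pizzaCandid = [pizza for pizza in pizzaCandid if pizza[pref[i][0]] == pref[i][1]]
--
--         if len(pizzaCandid) == 1:
--             break
--
--     return pizzaCandid[0]
-- ===== SOURCE B (Python) =====
-- from typing import Dict, List, Tuple
--
-- def find_pizza_combination(combinations: List[Tuple[Dict[str, str], int]]) -> Dict[str, str]:
--     max_count = max(count for _, count in combinations)
--     candidates = [pizza for pizza, count in combinations if count == max_count]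
--     if len(candidates) == 1:
--         return candidates[0]
--     pref = [("crust", "Pan"), ("seasoning", "Yes"), ("sauce", "Tomato"), ("veggies", "Broccoli"), ("cheese", "No")]
--     # Lexicographic max over the preference-match vector; max returns the first
--     # element attaining the greatest key, matching the greedy filter's tie-break.
--     return max(candidates, key=lambda p: tuple(p.get(k) == v for k, v in pref))
-- ===== Notes on version B (the rewrite author's own statement) =====
-- stated objective: simpler
-- what changed: Replaces A's stateful greedy loop (repeatedly counting matches, filtering the candidate list and breaking early) by a single max(candidates, key=preference-match boolean tuple), relying on Python's lexicographic tuple order and first-maximal tie-break.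
import Mathlib
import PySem

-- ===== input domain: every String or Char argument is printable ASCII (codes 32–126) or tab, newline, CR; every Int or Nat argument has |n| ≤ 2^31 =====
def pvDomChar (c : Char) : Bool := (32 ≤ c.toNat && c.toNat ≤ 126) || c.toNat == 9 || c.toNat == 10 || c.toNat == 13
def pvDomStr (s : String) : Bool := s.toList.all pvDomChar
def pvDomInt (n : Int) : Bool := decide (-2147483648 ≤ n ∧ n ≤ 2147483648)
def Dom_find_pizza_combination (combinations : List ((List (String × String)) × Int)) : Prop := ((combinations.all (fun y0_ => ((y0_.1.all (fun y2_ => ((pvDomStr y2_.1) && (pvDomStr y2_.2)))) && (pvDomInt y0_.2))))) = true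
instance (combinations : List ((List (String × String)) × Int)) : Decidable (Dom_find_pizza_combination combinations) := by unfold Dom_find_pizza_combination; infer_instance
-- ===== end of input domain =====

-- B replaces A's greedy preference-filter loop by one max(candidates, key = preference-match
-- vector) selection (objective: simpler); equal wherever A returns normally (Pre_ below).

-- ===== PORT A =====
-- shared fixed preference table (the literal appears in both Pythons)
def pvPrefs : List (String × String) :=
  [("crust", "Pan"), ("seasoning", "Yes"), ("sauce", "Tomato"), ("veggies", "Broccoli"), ("cheese", "No")]

-- pizza[k] / pizza.get(k): first matching key.  Python raises KeyError (A) / yields None (B)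
-- when the key is absent; "" is never compared against, and Pre_ keeps A's KeyError inputs out,
-- so the "" default is exact on the admitted inputs.
def pvLookup (d : List (String × String)) (k : String) : String :=
  ((d.find? (fun p => p.1 == k)).map Prod.snd).getD ""

-- the 'for i in range(len(pref))' loop over the candidate list, with its two breaks
def pvLoopA (prefs : List (String × String)) (cand : List (List (String × String))) :
    List (List (String × String)) :=
  match prefs with
  | [] => cand
  | kv :: rest =>
    let matchPref := (cand.map (fun pizza => pvLookup pizza kv.1 == kv.2)).count true
    if matchPref = 0 then pvLoopA rest cand
    else
      let cand' := cand.filter (fun pizza => pvLookup pizza kv.1 == kv.2)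
      if cand'.length = 1 then cand' else pvLoopA rest cand'

def find_pizza_combination (combinations : List ((List (String × String)) × Int)) : List (String × String) :=
  -- max([...]) raises ValueError on []: such inputs are outside Pre_
  let maxCount := (PySem.List.max? (combinations.map (fun x => x.2)) (fun y => y)).getD 0
  let pizzaCandid := (combinations.filter (fun x => x.2 == maxCount)).map (fun x => x.1)
  if pizzaCandid.length = 1 then pizzaCandid.headD []
  else (pvLoopA pvPrefs pizzaCandid).headD []

-- ===== PORT B =====
-- Python's tuple-of-bools comparison: lexicographic, False < True
def pvLexLt : List Bool → List Bool → Bool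
  | [], [] => false
  | [], _ :: _ => true
  | _ :: _, [] => false
  | a :: as, b :: bs => (!a && b) || (a == b && pvLexLt as bs)

-- max(xs, key=key): running best, replaced only on a strictly greater key (first maximal wins)
def pvMaxBy {α : Type} (key : α → List Bool) : α → List α → α
  | best, [] => best
  | best, x :: xs => pvMaxBy key (if pvLexLt (key best) (key x) then x else best) xs

-- lambda p: tuple(p.get(k) == v for k, v in pref)
def pvKey (p : List (String × String)) : List Bool :=
  pvPrefs.map (fun kv => pvLookup p kv.1 == kv.2)

def find_pizza_combination_alt (combinations : List ((List (String × String)) × Int)) : List (String × String) :=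
  let maxCount := (PySem.List.max? (combinations.map (fun x => x.2)) (fun y => y)).getD 0
  let candidates := (combinations.filter (fun x => x.2 == maxCount)).map (fun x => x.1)
  if candidates.length = 1 then candidates.headD []
  else
    match candidates with
    | [] => []  -- unreachable: on [] Python's max already raised; outside Pre_
    | c :: cs => pvMaxBy pvKey c cs

-- ===== PRECONDITION & SPEC =====
-- the pizzas of maximal count (A's candidate set, stated directly: count ≥ every count)
def pvMaxCand (combinations : List ((List (String × String)) × Int)) :
    List (List (String × String)) :=
  (combinations.filter (fun x => combinations.all (fun y => decide (y.2 ≤ x.2)))).map (fun x => x.1)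

-- lexicographically greatest preference-match vector among a list of vectors
def pvVmax (vs : List (List Bool)) : List Bool :=
  vs.foldl (fun b v => if pvLexLt b v then v else b) []

-- candidates whose first i preference-match bits tie the lexicographic maximum:
-- exactly the candidates still alive when A's loop reaches preference i
def pvSurv (combinations : List ((List (String × String)) × Int)) (i : Nat) :
    List (List (String × String)) :=
  let C := pvMaxCand combinations
  let m := pvVmax (C.map pvKey)
  C.filter (fun p => (pvKey p).take i == m.take i)

-- 'no KeyError': whenever ≥ 2 candidates tie the best match-vector on the first i preferences,
-- each of them carries preference key i
def pvPrefOk (combinations : List ((List (String × String)) × Int)) : Bool :=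
  (List.range 5).all (fun i =>
    (pvSurv combinations i).length < 2 ||
    (pvSurv combinations i).all (fun p =>
      (p.find? (fun q => q.1 == (pvPrefs.getD i ("", "")).1)).isSome))

-- Pre_ excludes exactly the inputs on which A raises: the empty list (max() raises ValueError)
-- and inputs where the preference loop consults a key missing from a still-surviving candidate
-- (KeyError); everywhere A returns, Pre_ holds and B is proved equal.
def Pre_find_pizza_combination (combinations : List ((List (String × String)) × Int)) : Prop :=
  combinations ≠ [] ∧ pvPrefOk combinations = true

instance (combinations : List ((List (String × String)) × Int)) : Decidable (Pre_find_pizza_combination combinations) := by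
  unfold Pre_find_pizza_combination; infer_instance

def pvWitness_find_pizza_combination : (List ((List (String × String)) × Int)) :=
  [([("crust", "Pan")], 1), ([("crust", "Thin")], 0)]

def Spec_find_pizza_combination (combinations : List ((List (String × String)) × Int)) (out : List (String × String)) : Prop := out = find_pizza_combination_alt combinations
instance (combinations : List ((List (String × String)) × Int)) (out : List (String × String)) : Decidable (Spec_find_pizza_combination combinations out) := by unfold Spec_find_pizza_combination; infer_instance

-- ===== CLAIM (what is proved, stated in full; the proofs are below) =====
def Claim_equal_find_pizza_combination : Prop := ∀ (combinations : List ((List (String × String)) × Int)), Dom_find_pizza_combination combinations → Pre_find_pizza_combination combinations → Spec_find_pizza_combination combinations (find_pizza_combination combinations)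

-- ===== LEMMAS AND PROOFS =====

-- key function over an arbitrary (sub)list of preferences; pvKey = pvKeyFn pvPrefs
def pvKeyFn (prefs : List (String × String)) (p : List (String × String)) : List Bool :=
  prefs.map (fun kv => pvLookup p kv.1 == kv.2)

theorem pvMaxBy_nil_key {α : Type} : ∀ (cs : List α) (c : α),
    pvMaxBy (fun _ => ([] : List Bool)) c cs = c := by
  intro cs
  induction cs with
  | nil => intro c; rfl
  | cons x xs ih => intro c; simpa [pvMaxBy, pvLexLt] using ih c

theorem pvMaxBy_cons_false {α : Type} (g : α → List Bool) (b : α → Bool) :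
    ∀ (cs : List α) (c : α), (∀ p ∈ c :: cs, b p = false) →
    pvMaxBy (fun p => b p :: g p) c cs = pvMaxBy g c cs := by
  intro cs
  induction cs with
  | nil => intro c _; rfl
  | cons x xs ih =>
    intro c h
    have hc : b c = false := h c (by simp)
    have hx : b x = false := h x (by simp)
    have hcond : pvLexLt (b c :: g c) (b x :: g x) = pvLexLt (g c) (g x) := by
      simp [pvLexLt, hc, hx]
    simp only [pvMaxBy, hcond]
    by_cases hlt : pvLexLt (g c) (g x) = true
    · simp only [hlt, if_true]
      exact ih x (fun p hp => h p (by simp at hp ⊢; tauto))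
    · simp only [Bool.not_eq_true] at hlt
      simp only [hlt, Bool.false_eq_true, if_false]
      exact ih c (fun p hp => h p (by simp at hp ⊢; tauto))

theorem pvMaxBy_filter {α : Type} (g : α → List Bool) (b : α → Bool) :
    ∀ (cs : List α) (c c' : α) (cs' : List α),
    (c :: cs).filter b = c' :: cs' →
    pvMaxBy (fun p => b p :: g p) c cs = pvMaxBy g c' cs' := by
  intro cs
  induction cs with
  | nil =>
    intro c c' cs' h
    cases hbc : b c <;> simp [hbc] at h
    obtain ⟨h1, h2⟩ := h
    subst h1; subst h2; rfl
  | cons x xs ih =>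
    intro c c' cs' h
    cases hbc : b c <;> cases hbx : b x
    · -- both false: neither survives the filter
      have hcond : pvLexLt (b c :: g c) (b x :: g x) = pvLexLt (g c) (g x) := by
        simp [pvLexLt, hbc, hbx]
      have hf : (c :: x :: xs).filter b = xs.filter b := by
        simp [hbc, hbx]
      rw [hf] at h
      simp only [pvMaxBy, hcond]
      by_cases hlt : pvLexLt (g c) (g x) = true
      · simp only [hlt, if_true]
        exact ih x c' cs' (by simp [hbx, h])
      · simp only [Bool.not_eq_true] at hlt
        simp only [hlt, Bool.false_eq_true, if_false]
        exact ih c c' cs' (by simp [hbc, h])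
    · -- b c = false, b x = true: x ousts c
      have hcond : pvLexLt (b c :: g c) (b x :: g x) = true := by
        simp [pvLexLt, hbc, hbx]
      have hf : (c :: x :: xs).filter b = x :: xs.filter b := by
        simp [hbc, hbx]
      rw [hf] at h
      simp only [pvMaxBy, hcond, if_true]
      exact ih x c' cs' (by simp [hbx, h])
    · -- b c = true, b x = false: c stays best
      have hcond : pvLexLt (b c :: g c) (b x :: g x) = false := by
        simp [pvLexLt, hbc, hbx]
      have hf : (c :: x :: xs).filter b = c :: xs.filter b := by
        simp [hbc, hbx]
      rw [hf] at h
      simp only [pvMaxBy, hcond, Bool.false_eq_true, if_false]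
      exact ih c c' cs' (by simp [hbc, h])
    · -- both true: tail keys decide
      have hcond : pvLexLt (b c :: g c) (b x :: g x) = pvLexLt (g c) (g x) := by
        simp [pvLexLt, hbc, hbx]
      have hf : (c :: x :: xs).filter b = c :: x :: xs.filter b := by
        simp [hbc, hbx]
      rw [hf] at h
      injection h with h1 h2
      subst h1; subst h2
      simp only [pvMaxBy, hcond]
      by_cases hlt : pvLexLt (g c) (g x) = true
      · simp only [hlt, if_true]
        exact ih x x (xs.filter b) (by simp [hbx])
      · simp only [Bool.not_eq_true] at hlt
        simp only [hlt, Bool.false_eq_true, if_false]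
        exact ih c c (xs.filter b) (by simp [hbc])

theorem loop_eq_max : ∀ (prefs : List (String × String)) (c : List (String × String))
    (cs : List (List (String × String))),
    (pvLoopA prefs (c :: cs)).headD [] = pvMaxBy (pvKeyFn prefs) c cs := by
  intro prefs
  induction prefs with
  | nil =>
    intro c cs
    show (c :: cs).headD [] = pvMaxBy (pvKeyFn []) c cs
    have hk : pvKeyFn [] = fun _ => ([] : List Bool) := rfl
    rw [hk, pvMaxBy_nil_key]
    rfl
  | cons kv rest ih =>
    intro c cs
    have hK : pvKeyFn (kv :: rest) = fun p => (pvLookup p kv.1 == kv.2) :: pvKeyFn rest p := rfl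
    by_cases h0 : (((c :: cs).map (fun pizza => pvLookup pizza kv.1 == kv.2)).count true) = 0
    · have hall : ∀ p ∈ c :: cs, (pvLookup p kv.1 == kv.2) = false := by
        intro p hp
        have := List.count_eq_zero.mp h0
        by_contra hcontra
        exact this (List.mem_map.mpr ⟨p, hp, by simpa using hcontra⟩)
      show (pvLoopA (kv :: rest) (c :: cs)).headD [] = _
      simp only [pvLoopA, h0, if_true]
      rw [ih c cs, hK, pvMaxBy_cons_false _ _ _ _ hall]
    · have hex : ∃ p ∈ c :: cs, (pvLookup p kv.1 == kv.2) = true := by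
        by_contra hcontra
        push Not at hcontra
        exact h0 (List.count_eq_zero.mpr (by
          intro hmem
          obtain ⟨p, hp, hpe⟩ := List.mem_map.mp hmem
          exact (hcontra p hp) hpe))
      have hfne : (c :: cs).filter (fun pizza => pvLookup pizza kv.1 == kv.2) ≠ [] := by
        obtain ⟨p, hp, hpe⟩ := hex
        intro hnil
        have : p ∈ (c :: cs).filter (fun pizza => pvLookup pizza kv.1 == kv.2) :=
          List.mem_filter.mpr ⟨hp, hpe⟩
        rw [hnil] at this; exact absurd this (List.not_mem_nil)
      obtain ⟨c', cs', hf⟩ : ∃ c' cs',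
          (c :: cs).filter (fun pizza => pvLookup pizza kv.1 == kv.2) = c' :: cs' := by
        cases hff : (c :: cs).filter (fun pizza => pvLookup pizza kv.1 == kv.2) with
        | nil => exact absurd hff hfne
        | cons a l => exact ⟨a, l, rfl⟩
      have hmax : pvMaxBy (pvKeyFn (kv :: rest)) c cs = pvMaxBy (pvKeyFn rest) c' cs' := by
        rw [hK]; exact pvMaxBy_filter _ _ _ _ _ _ hf
      show (pvLoopA (kv :: rest) (c :: cs)).headD [] = _
      simp only [pvLoopA, h0, if_false, hf]
      by_cases h1 : (c' :: cs').length = 1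
      · have hcs' : cs' = [] := by
          simpa using h1
        subst hcs'
        simp only [h1, if_true, hmax]
        rfl
      · simp only [h1, if_false]
        rw [ih c' cs', hmax]

theorem pvCandidates_ne_nil (combinations : List ((List (String × String)) × Int))
    (hne : combinations ≠ []) :
    (combinations.filter (fun x => x.2 ==
        (PySem.List.max? (combinations.map (fun x => x.2)) (fun y => y)).getD 0)).map
      (fun x => x.1) ≠ [] := by
  cases hmx : PySem.List.max? (combinations.map (fun x => x.2)) (fun y => y) with
  | none =>
    have : combinations.map (fun x => x.2) = [] := (PySem.List.max?_eq_none_iff _ _).mp hmx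
    simp only [List.map_eq_nil_iff] at this
    exact absurd this hne
  | some m0 =>
    have hmem : m0 ∈ combinations.map (fun x => x.2) := PySem.List.max?_mem hmx
    obtain ⟨x, hx, hx2⟩ := List.mem_map.mp hmem
    have : x ∈ combinations.filter (fun x => x.2 ==
        (PySem.List.max? (combinations.map (fun x => x.2)) (fun y => y)).getD 0) := by
      refine List.mem_filter.mpr ⟨hx, ?_⟩
      simp [hmx, hx2]
    intro hnil
    rw [List.map_eq_nil_iff] at hnil
    rw [hmx] at this
    rw [hnil] at this
    exact absurd this (List.not_mem_nil)

-- ===== VERDICT =====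
theorem find_pizza_combination_spec : Claim_equal_find_pizza_combination := by
  intro combinations hdom hpre
  obtain ⟨hne, -⟩ := hpre
  show find_pizza_combination combinations = find_pizza_combination_alt combinations
  have hcne := pvCandidates_ne_nil combinations hne
  unfold find_pizza_combination find_pizza_combination_alt
  cases hcc : (combinations.filter (fun x => x.2 ==
      (PySem.List.max? (combinations.map (fun x => x.2)) (fun y => y)).getD 0)).map
      (fun x => x.1) with
  | nil => exact absurd hcc hcne
  | cons c cs =>
    simp only [hcc]
    by_cases h1 : (c :: cs).length = 1
    · simp only [h1, if_true]
    · simp only [h1, if_false]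
      exact loop_eq_max pvPrefs c cs
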